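-- pv_equiv track=rewrite | github.com/puma10/todo | import_external_tasks.py | find_section_indices
-- ===== SOURCE A (Python) =====
-- from typing import Any, Dict, List, Sequence
--
-- def find_section_indices(lines: List[str], section: str) -> tuple[int, int]:
--     section_idx = -1
--     insert_idx = len(lines)
--     for idx, line in enumerate(lines):
--         stripped = line.strip()
--         if not stripped:
--             continue
--         if line.lstrip() != line:
--             continue
--         if stripped == section:
--             section_idx = idx
--             next_idx = len(lines)
--             for j in range(idx + 1, len(lines)):
--                 next_line = lines[j]
--                 next_stripped = next_line.strip()
--                 if not next_stripped:
--                     continue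
--                 if next_line.lstrip() == next_line:
--                     next_idx = j
--                     break
--             insert_idx = next_idx
--             break
--     return section_idx, insert_idx
-- ===== SOURCE B (Python) =====
-- def find_section_indices(lines, section):
--     tops = [(i, l) for i, l in enumerate(lines) if l.strip() and l.lstrip() == l]
--     for p, (i, l) in enumerate(tops):
--         if l.strip() == section:
--             return i, (tops[p + 1][0] if p + 1 < len(tops) else len(lines))
--     return -1, len(lines)
-- ===== Notes on version B (the rewrite author's own statement) =====
-- stated objective: alternative
-- what changed: Replaces A's nested early-break scans with a precomputed table of top-level header (index, line) pairs followed by a single scan with a successor lookup for the insertion point.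
import Mathlib
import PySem

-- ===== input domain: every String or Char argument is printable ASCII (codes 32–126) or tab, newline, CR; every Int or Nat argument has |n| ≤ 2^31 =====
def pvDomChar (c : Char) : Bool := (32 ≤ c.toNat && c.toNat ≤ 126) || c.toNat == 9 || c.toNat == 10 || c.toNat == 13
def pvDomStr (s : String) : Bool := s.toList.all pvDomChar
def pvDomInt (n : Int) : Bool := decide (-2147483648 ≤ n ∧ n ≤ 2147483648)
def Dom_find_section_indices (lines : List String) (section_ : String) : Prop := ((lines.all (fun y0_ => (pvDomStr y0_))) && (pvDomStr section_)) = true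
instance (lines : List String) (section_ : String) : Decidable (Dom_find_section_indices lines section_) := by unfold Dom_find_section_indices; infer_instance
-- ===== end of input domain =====

-- B replaces A's nested early-break scans with a precomputed table of top-level
-- header (index, line) pairs plus a successor lookup (alternative decomposition, same cost).

-- ===== PORT A =====
-- inner loop: for j in range(idx+1, len(lines)) over the remaining enumerated lines
def pvInnerA (n : Int) : List (Int × String) → Int
  | [] => n
  | (j, next_line) :: rest =>
    let next_stripped := PySem.Str.strip next_line
    if next_stripped = "" then pvInnerA n rest
    else if PySem.Str.lstrip next_line = next_line then j
    else pvInnerA n rest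

-- outer loop: for idx, line in enumerate(lines)
def pvOuterA (section_ : String) (n : Int) : List (Int × String) → Int × Int
  | [] => (-1, n)
  | (idx, line) :: rest =>
    let stripped := PySem.Str.strip line
    if stripped = "" then pvOuterA section_ n rest
    else if PySem.Str.lstrip line ≠ line then pvOuterA section_ n rest
    else if stripped = section_ then (idx, pvInnerA n rest)
    else pvOuterA section_ n rest

def find_section_indices (lines : List String) (section_ : String) : Int × Int :=
  pvOuterA section_ (lines.length : Int) (PySem.List.enumerate lines)

-- ===== PORT B =====
def pvIsTop (p : Int × String) : Bool :=
  !(PySem.Str.strip p.2 == "") && (PySem.Str.lstrip p.2 == p.2)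

-- scan of tops with successor lookup (tops[p+1][0] if present else len(lines))
def pvScanB (section_ : String) (n : Int) : List (Int × String) → Int × Int
  | [] => (-1, n)
  | (i, l) :: rest =>
    if PySem.Str.strip l = section_ then
      (i, match rest with | [] => n | (j, _) :: _ => j)
    else pvScanB section_ n rest

def find_section_indices_alt (lines : List String) (section_ : String) : Int × Int :=
  let tops := (PySem.List.enumerate lines).filter pvIsTop
  pvScanB section_ (lines.length : Int) tops

-- ===== PRECONDITION & SPEC =====
def Spec_find_section_indices (lines : List String) (section_ : String) (out : Int × Int) : Prop := out = find_section_indices_alt lines section_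
instance (lines : List String) (section_ : String) (out : Int × Int) : Decidable (Spec_find_section_indices lines section_ out) := by unfold Spec_find_section_indices; infer_instance

-- ===== CLAIM (what is proved, stated in full; the proofs are below) =====
def Claim_equal_find_section_indices : Prop := ∀ (lines : List String) (section_ : String), Dom_find_section_indices lines section_ → Spec_find_section_indices lines section_ (find_section_indices lines section_)

-- ===== LEMMAS AND PROOFS =====
theorem pvInnerA_eq_filter (n : Int) (es : List (Int × String)) :
    pvInnerA n es = (match es.filter pvIsTop with | [] => n | (j, _) :: _ => j) := by
  induction es with
  | nil => simp [pvInnerA]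
  | cons p rest ih =>
    obtain ⟨j, l⟩ := p
    by_cases h1 : PySem.Str.strip l = ""
    · simp [pvInnerA, h1, List.filter_cons, pvIsTop, beq_iff_eq, ih]
    · by_cases h2 : PySem.Str.lstrip l = l
      · simp [pvInnerA, h1, h2, List.filter_cons, pvIsTop, beq_iff_eq]
      · simp [pvInnerA, h1, h2, List.filter_cons, pvIsTop, beq_iff_eq, ih]

theorem pvOuterA_eq_scanB (section_ : String) (n : Int) (es : List (Int × String)) :
    pvOuterA section_ n es = pvScanB section_ n (es.filter pvIsTop) := by
  induction es with
  | nil => simp [pvOuterA, pvScanB]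
  | cons p rest ih =>
    obtain ⟨i, l⟩ := p
    by_cases h1 : PySem.Str.strip l = ""
    · simp [pvOuterA, h1, List.filter_cons, pvIsTop, beq_iff_eq, ih]
    · by_cases h2 : PySem.Str.lstrip l = l
      · by_cases h3 : PySem.Str.strip l = section_
        · subst h3
          simp [pvOuterA, h1, h2, List.filter_cons, pvIsTop, beq_iff_eq, pvScanB, pvInnerA_eq_filter]
        · simp [pvOuterA, h1, h2, h3, List.filter_cons, pvIsTop, beq_iff_eq, pvScanB, ih]
      · simp [pvOuterA, h1, h2, List.filter_cons, pvIsTop, beq_iff_eq, ih]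

-- ===== VERDICT (by name: the statement is the Claim_ definition above) =====
theorem find_section_indices_spec : Claim_equal_find_section_indices := by
  intro lines section_ _
  unfold Spec_find_section_indices find_section_indices find_section_indices_alt
  exact pvOuterA_eq_scanB section_ (lines.length : Int) (PySem.List.enumerate lines)
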